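-- pv_equiv track=rewrite | github.com/veryfansome/germ | bot/lang/tokenizer.py | corpus_to_sequences
-- ===== SOURCE A (Python) =====
-- def corpus_to_sequences(corpus, char2idx, label2idx):
--     x_list = []
--     y_list = []
--
--     for sentence_tokens in corpus:
--         sentence_chars, sentence_labels = tokenize_chars_and_labels(sentence_tokens)
--
--         x = [encode_char(c, char2idx) for c in sentence_chars]
--         y = [label2idx[label] for label in sentence_labels]
--
--         x_list.append(x)
--         y_list.append(y)
--
--     return x_list, y_list
--
-- def encode_char(ch, char2idx):
--     """
--     Convert a single character into its integer ID.
--     If it's not found in char2idx, return the index for '[UNK]'.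
--     """
--     if ch in char2idx:
--         return char2idx[ch]
--     else:
--         return char2idx["[UNK]"]
--
-- def tokenize_chars_and_labels(sentence_tokens):
--     """
--     For a single sentence (list of tokens), return:
--       - list of characters (flattened across tokens)
--       - list of B/I/E/S tags (aligned with each character)
--     """
--     chars = []
--     labels = []
--
--     for token in sentence_tokens:
--         if len(token) == 1:
--             # Single-character token => label is S
--             chars.append(token[0])
--             labels.append("S")
--         else:
--             # Multi-character token
--             token_len = len(token)
--             for i, c in enumerate(token):
--                 if i == 0:
--                     chars.append(c)
--                     labels.append("B")
--                 elif i == token_len - 1: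
--                     chars.append(c)
--                     labels.append("E")
--                 else:
--                     chars.append(c)
--                     labels.append("I")
--     return chars, labels
-- ===== SOURCE B (Python) =====
-- def corpus_to_sequences(corpus, char2idx, label2idx):
--     # Memoize each distinct token's encoded (char-ids, label-ids) pair, so a
--     # repeated token is encoded once and later occurrences are a dict hit.
--     cache = {}
--     x_list, y_list = [], []
--     for sentence_tokens in corpus:
--         x, y = [], []
--         for token in sentence_tokens:
--             if token not in cache:
--                 cache[token] = encode_token(token, char2idx, label2idx)
--             tx, ty = cache[token]
--             x.extend(tx)
--             y.extend(ty)
--         x_list.append(x)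
--         y_list.append(y)
--     return x_list, y_list
--
-- def bies_pattern(n):
--     """BIES label pattern for a token of n characters."""
--     if n == 0:
--         return ""
--     if n == 1:
--         return "S"
--     return "B" + "I" * (n - 2) + "E"
--
-- def encode_token(token, char2idx, label2idx):
--     """Encode one token: char ids (with lazy '[UNK]' fallback) and label ids."""
--     xs = [char2idx[c] if c in char2idx else char2idx["[UNK]"] for c in token]
--     ys = [label2idx[l] for l in bies_pattern(len(token))]
--     return xs, ys
-- ===== Notes on version B (the rewrite author's own statement) =====
-- stated objective: alternative
-- what changed: B memoizes each distinct token's encoded (char-ids, label-ids) pair in a cache dict built lazily during the traversal, so repeated tokens are encoded once, and derives labels from a closed-form BIES pattern string instead of A's per-position index branching.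
import Mathlib
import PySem

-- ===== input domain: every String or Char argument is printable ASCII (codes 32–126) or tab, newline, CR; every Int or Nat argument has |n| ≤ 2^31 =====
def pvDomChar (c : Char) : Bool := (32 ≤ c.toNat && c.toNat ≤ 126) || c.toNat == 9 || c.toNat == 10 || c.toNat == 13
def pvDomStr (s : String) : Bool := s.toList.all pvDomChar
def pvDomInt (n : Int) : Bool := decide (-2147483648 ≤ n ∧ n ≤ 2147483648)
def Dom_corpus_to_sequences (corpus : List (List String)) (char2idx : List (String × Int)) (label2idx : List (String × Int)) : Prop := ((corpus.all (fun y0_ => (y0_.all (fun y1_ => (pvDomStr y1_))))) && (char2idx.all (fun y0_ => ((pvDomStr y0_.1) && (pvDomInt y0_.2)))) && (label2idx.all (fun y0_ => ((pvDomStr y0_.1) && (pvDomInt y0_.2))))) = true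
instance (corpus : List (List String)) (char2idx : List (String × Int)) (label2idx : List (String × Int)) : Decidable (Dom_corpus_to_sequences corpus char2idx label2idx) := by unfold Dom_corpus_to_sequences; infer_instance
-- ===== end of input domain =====

-- B memoizes each distinct token's encoded (char-ids, label-ids) pair in a lazily built cache
-- dict and derives labels from a closed-form BIES pattern, instead of A's per-position branching.

-- ===== PORT A =====
-- dict lookups are total via .getD 0; Pre_ excludes exactly the inputs where the Python raises KeyError,
-- so the default is never reached on admitted inputs.
def pv_encode_char (ch : String) (char2idx : List (String × Int)) : Int :=
  if (PySem.Dict.mk char2idx).contains ch then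
    ((PySem.Dict.mk char2idx).get? ch).getD 0
  else
    ((PySem.Dict.mk char2idx).get? "[UNK]").getD 0

def pv_tokenize_chars_and_labels (sentence_tokens : List String) : List Char × List String :=
  sentence_tokens.foldl (fun acc token =>
    let cs := token.toList
    if cs.length == 1 then
      (acc.1 ++ [PySem.List.pyGetD cs 0 ' '], acc.2 ++ ["S"])
    else
      (PySem.List.enumerate cs 0).foldl (fun acc2 ic =>
        if ic.1 == 0 then (acc2.1 ++ [ic.2], acc2.2 ++ ["B"])
        else if ic.1 == (cs.length : Int) - 1 then (acc2.1 ++ [ic.2], acc2.2 ++ ["E"])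
        else (acc2.1 ++ [ic.2], acc2.2 ++ ["I"])) acc
  ) ([], [])

def corpus_to_sequences (corpus : List (List String)) (char2idx : List (String × Int)) (label2idx : List (String × Int)) : List (List Int) × List (List Int) :=
  corpus.foldl (fun acc sentence_tokens =>
    let cl := pv_tokenize_chars_and_labels sentence_tokens
    let x := cl.1.map (fun c => pv_encode_char (String.ofList [c]) char2idx)
    let y := cl.2.map (fun lab => ((PySem.Dict.mk label2idx).get? lab).getD 0)
    (acc.1 ++ [x], acc.2 ++ [y])) ([], [])

-- ===== PORT B =====
def pv_bies_pattern (n : Nat) : List Char :=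
  if n == 0 then []
  else if n == 1 then ['S']
  else 'B' :: (List.replicate (n - 2) 'I' ++ ['E'])

def pv_encode_token (token : String) (char2idx : List (String × Int)) (label2idx : List (String × Int)) : List Int × List Int :=
  (token.toList.map (fun c =>
     if (PySem.Dict.mk char2idx).contains (String.ofList [c]) then
       ((PySem.Dict.mk char2idx).get? (String.ofList [c])).getD 0
     else ((PySem.Dict.mk char2idx).get? "[UNK]").getD 0),
   (pv_bies_pattern token.toList.length).map (fun l =>
     ((PySem.Dict.mk label2idx).get? (String.ofList [l])).getD 0))

def corpus_to_sequences_alt (corpus : List (List String)) (char2idx : List (String × Int)) (label2idx : List (String × Int)) : List (List Int) × List (List Int) :=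
  (corpus.foldl (fun acc sentence_tokens =>
    let inner := sentence_tokens.foldl (fun st token =>
      let cache1 := if st.1.contains token then st.1
                    else st.1.insert token (pv_encode_token token char2idx label2idx)
      let v := (cache1.get? token).getD ([], [])
      (cache1, (st.2.1 ++ v.1, st.2.2 ++ v.2)))
      (acc.1, (([] : List Int), ([] : List Int)))
    (inner.1, (acc.2.1 ++ [inner.2.1], acc.2.2 ++ [inner.2.2])))
    ((PySem.Dict.empty : PySem.Dict String (List Int × List Int)), (([] : List (List Int)), ([] : List (List Int))))).2

-- ===== PRECONDITION & SPEC =====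
-- Pre_ excludes exactly the inputs on which the Python A raises KeyError: a token character missing
-- from char2idx while '[UNK]' is also missing, or an emitted B/I/E/S label missing from label2idx.
def Pre_corpus_to_sequences (corpus : List (List String)) (char2idx : List (String × Int)) (label2idx : List (String × Int)) : Prop :=
  ∀ s ∈ corpus, ∀ t ∈ s,
    (∀ c ∈ t.toList, (PySem.Dict.mk char2idx).contains (String.ofList [c]) = true ∨ (PySem.Dict.mk char2idx).contains "[UNK]" = true) ∧
    (t.toList.length = 1 → (PySem.Dict.mk label2idx).contains "S" = true) ∧
    (2 ≤ t.toList.length → (PySem.Dict.mk label2idx).contains "B" = true ∧ (PySem.Dict.mk label2idx).contains "E" = true) ∧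
    (3 ≤ t.toList.length → (PySem.Dict.mk label2idx).contains "I" = true)
instance (corpus : List (List String)) (char2idx : List (String × Int)) (label2idx : List (String × Int)) : Decidable (Pre_corpus_to_sequences corpus char2idx label2idx) := by unfold Pre_corpus_to_sequences; infer_instance

def pvWitness_corpus_to_sequences : List (List String) × (List (String × Int)) × (List (String × Int)) :=
  ([], [], [])

def Spec_corpus_to_sequences (corpus : List (List String)) (char2idx : List (String × Int)) (label2idx : List (String × Int)) (out : List (List Int) × List (List Int)) : Prop := out = corpus_to_sequences_alt corpus char2idx label2idx
instance (corpus : List (List String)) (char2idx : List (String × Int)) (label2idx : List (String × Int)) (out : List (List Int) × List (List Int)) : Decidable (Spec_corpus_to_sequences corpus char2idx label2idx out) := by unfold Spec_corpus_to_sequences; infer_instance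

-- ===== CLAIM (what is proved, stated in full; the proofs are below) =====
def Claim_equal_corpus_to_sequences : Prop := ∀ (corpus : List (List String)) (char2idx : List (String × Int)) (label2idx : List (String × Int)), Dom_corpus_to_sequences corpus char2idx label2idx → Pre_corpus_to_sequences corpus char2idx label2idx → Spec_corpus_to_sequences corpus char2idx label2idx (corpus_to_sequences corpus char2idx label2idx)

-- ===== LEMMAS AND PROOFS =====

-- the per-token label sequence, as strings
def strPat (n : Nat) : List String :=
  if n = 0 then [] else if n = 1 then ["S"] else "B" :: (List.replicate (n - 2) "I" ++ ["E"])

-- A's enumerate loop tail (indices ≥ 1): all "I" except "E" at the last position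
theorem enum_tail_map (rest : List Char) (k n : Nat) (hk : 1 ≤ k) (hn : k + rest.length = n) (hne : rest ≠ []) :
    (PySem.List.enumerate rest (k : Int)).map
      (fun ic => if ic.1 == 0 then "B" else if ic.1 == (n : Int) - 1 then "E" else "I")
      = List.replicate (rest.length - 1) "I" ++ ["E"] := by
  induction rest generalizing k with
  | nil => exact absurd rfl hne
  | cons c t ih =>
    rw [PySem.List.enumerate_cons]
    cases t with
    | nil =>
      simp only [PySem.List.enumerate_nil, List.map_cons, List.map_nil]
      have h0 : ((k : Int) == 0) = false := by simp; omega
      have h1 : ((k : Int) == (n : Int) - 1) = true := by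
        simp only [List.length_cons, List.length_nil] at hn; simp; omega
      simp [h0, h1]
    | cons c2 t2 =>
      have h0 : ((k : Int) == 0) = false := by simp; omega
      have h1 : ((k : Int) == (n : Int) - 1) = false := by
        simp only [List.length_cons] at hn; simp; omega
      have : ((k : Int) + 1) = ((k + 1 : Nat) : Int) := by push_cast; ring
      rw [List.map_cons, this, ih (k + 1) (by omega) (by simp at hn ⊢; omega) (by simp)]
      simp [h0, h1, List.length_cons]
      rw [List.replicate_succ]
      simp

-- A's enumerate loop (multi-character branch) produces strPat
theorem enum_map_eq_strPat (cs : List Char) (h : cs.length ≠ 1) :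
    (PySem.List.enumerate cs 0).map
      (fun ic => if ic.1 == 0 then "B" else if ic.1 == (cs.length : Int) - 1 then "E" else "I")
      = strPat cs.length := by
  cases cs with
  | nil => simp [PySem.List.enumerate_nil, strPat]
  | cons c t =>
    cases t with
    | nil => simp at h
    | cons c2 t2 =>
      rw [PySem.List.enumerate_cons, List.map_cons]
      rw [show ((0 : Int) + 1) = ((1 : Nat) : Int) from by norm_num]
      rw [enum_tail_map (c2 :: t2) 1 (c :: c2 :: t2).length (by omega) (by simp; omega) (by simp)]
      simp [strPat, List.length_cons]

-- A's per-token step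
theorem tokA_step (token : String) (acc : List Char × List String) :
    (let cs := token.toList
     if cs.length == 1 then
       (acc.1 ++ [PySem.List.pyGetD cs 0 ' '], acc.2 ++ ["S"])
     else
       (PySem.List.enumerate cs 0).foldl (fun acc2 ic =>
         if ic.1 == 0 then (acc2.1 ++ [ic.2], acc2.2 ++ ["B"])
         else if ic.1 == (cs.length : Int) - 1 then (acc2.1 ++ [ic.2], acc2.2 ++ ["E"])
         else (acc2.1 ++ [ic.2], acc2.2 ++ ["I"])) acc)
    = (acc.1 ++ token.toList, acc.2 ++ strPat token.toList.length) := by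
  by_cases h1 : token.toList.length = 1
  · obtain ⟨c, hc⟩ : ∃ c, token.toList = [c] := by
      cases hcs : token.toList with
      | nil => simp [hcs] at h1
      | cons a t => cases t with
        | nil => exact ⟨a, rfl⟩
        | cons b u => simp [hcs] at h1
    simp [hc, strPat, PySem.List.pyGetD_zero_cons]
  · have hb : (token.toList.length == 1) = false := beq_eq_false_iff_ne.mpr h1
    simp only [hb, Bool.false_eq_true, if_false]
    have hstep : (fun (acc2 : List Char × List String) (ic : Int × Char) =>
        if ic.1 == 0 then (acc2.1 ++ [ic.2], acc2.2 ++ ["B"])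
        else if ic.1 == (token.toList.length : Int) - 1 then (acc2.1 ++ [ic.2], acc2.2 ++ ["E"])
        else (acc2.1 ++ [ic.2], acc2.2 ++ ["I"]))
      = (fun acc2 ic => (acc2.1 ++ [ic.2],
          acc2.2 ++ [if ic.1 == 0 then "B" else if ic.1 == (token.toList.length : Int) - 1 then "E" else "I"])) := by
      funext acc2 ic; split_ifs <;> rfl
    rw [hstep,
      PySem.List.foldl_prod_mk (f := fun a (ic : Int × Char) => a ++ [ic.2])
        (g := fun a (ic : Int × Char) => a ++ [if ic.1 == 0 then "B" else if ic.1 == (token.toList.length : Int) - 1 then "E" else "I"]),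
      PySem.List.foldl_append_singleton_eq_map, PySem.List.foldl_append_singleton_eq_map,
      PySem.List.map_snd_enumerate, enum_map_eq_strPat _ h1]

-- A's tokenizer in closed form
theorem tokenize_eq (sent : List String) :
    pv_tokenize_chars_and_labels sent
      = (sent.flatMap String.toList, sent.flatMap (fun t => strPat t.toList.length)) := by
  unfold pv_tokenize_chars_and_labels
  have hfun : (fun (acc : List Char × List String) (token : String) =>
      let cs := token.toList
      if cs.length == 1 then
        (acc.1 ++ [PySem.List.pyGetD cs 0 ' '], acc.2 ++ ["S"])
      else
        (PySem.List.enumerate cs 0).foldl (fun acc2 ic =>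
          if ic.1 == 0 then (acc2.1 ++ [ic.2], acc2.2 ++ ["B"])
          else if ic.1 == (cs.length : Int) - 1 then (acc2.1 ++ [ic.2], acc2.2 ++ ["E"])
          else (acc2.1 ++ [ic.2], acc2.2 ++ ["I"])) acc)
      = (fun acc token => (acc.1 ++ token.toList, acc.2 ++ strPat token.toList.length)) :=
    funext fun acc => funext fun token => tokA_step token acc
  rw [hfun,
    PySem.List.foldl_prod_mk (f := fun a (t : String) => a ++ t.toList)
      (g := fun a (t : String) => a ++ strPat t.toList.length),
    PySem.List.foldl_append_eq_flatMap, PySem.List.foldl_append_eq_flatMap]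
  simp

-- B's pattern, read as 1-character strings, is strPat
theorem pat_map_str (n : Nat) :
    (pv_bies_pattern n).map (fun c => String.ofList [c]) = strPat n := by
  unfold pv_bies_pattern strPat
  rcases n with _ | _ | m
  · decide
  · decide
  · rw [if_neg (by simp), if_neg (by simp), if_neg (by omega), if_neg (by omega)]
    simp only [List.map_cons, List.map_append, List.map_replicate]
    rw [show String.ofList ['B'] = "B" from by decide, show String.ofList ['I'] = "I" from by decide,
      show String.ofList ['E'] = "E" from by decide]
    simp

-- per-sentence target values (what both programs emit for one sentence)
def sentX (sent : List String) (char2idx label2idx : List (String × Int)) : List Int :=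
  sent.flatMap (fun t => (pv_encode_token t char2idx label2idx).1)
def sentY (sent : List String) (char2idx label2idx : List (String × Int)) : List Int :=
  sent.flatMap (fun t => (pv_encode_token t char2idx label2idx).2)

-- cache invariant: every stored value is the token's encoding
def CacheOK (cache : PySem.Dict String (List Int × List Int)) (char2idx label2idx : List (String × Int)) : Prop :=
  ∀ t v, cache.get? t = some v → v = pv_encode_token t char2idx label2idx

theorem cacheOK_empty (char2idx label2idx : List (String × Int)) :
    CacheOK PySem.Dict.empty char2idx label2idx := by
  intro t v h
  simp [PySem.Dict.get?_empty] at h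

-- B's inner per-token step in closed form, preserving the invariant
theorem innerB_step (cache : PySem.Dict String (List Int × List Int)) (char2idx label2idx : List (String × Int))
    (hc : CacheOK cache char2idx label2idx) (token : String) :
    (let cache1 := if cache.contains token then cache
                   else cache.insert token (pv_encode_token token char2idx label2idx)
     (cache1.get? token).getD ([], []) = pv_encode_token token char2idx label2idx
       ∧ CacheOK cache1 char2idx label2idx) := by
  by_cases h : cache.contains token = true
  · simp only [h, if_true]
    refine ⟨?_, hc⟩
    have := PySem.Dict.contains_eq_isSome_get? (d := cache) (k := token)
    rw [h] at this
    obtain ⟨v, hv⟩ := Option.isSome_iff_exists.mp this.symm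
    rw [hv, Option.getD_some, hc token v hv]
  · simp only [Bool.not_eq_true] at h
    simp only [h, Bool.false_eq_true, if_false]
    refine ⟨?_, ?_⟩
    · rw [PySem.Dict.get?_insert_self, Option.getD_some]
    · intro t v hv
      by_cases ht : t = token
      · subst ht
        rw [PySem.Dict.get?_insert_self] at hv
        exact (Option.some.injEq _ _ ▸ hv).symm ▸ rfl
      · rw [PySem.Dict.get?_insert_of_ne _ _ ht] at hv
        exact hc t v hv

-- B's inner sentence loop in closed form
theorem innerB_fold (sent : List String) (char2idx label2idx : List (String × Int)) :
    ∀ (cache : PySem.Dict String (List Int × List Int)) (x y : List Int),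
    CacheOK cache char2idx label2idx →
    ∃ cache', (sent.foldl (fun st token =>
        let cache1 := if st.1.contains token then st.1
                      else st.1.insert token (pv_encode_token token char2idx label2idx)
        let v := (cache1.get? token).getD ([], [])
        (cache1, (st.2.1 ++ v.1, st.2.2 ++ v.2))) (cache, (x, y)))
      = (cache', (x ++ sentX sent char2idx label2idx, y ++ sentY sent char2idx label2idx))
      ∧ CacheOK cache' char2idx label2idx := by
  induction sent with
  | nil => intro cache x y hc; exact ⟨cache, by simp [sentX, sentY], hc⟩
  | cons t rest ih =>
    intro cache x y hc
    obtain ⟨hval, hok⟩ := innerB_step cache char2idx label2idx hc t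
    simp only [List.foldl_cons]
    obtain ⟨cache', heq, hok'⟩ := ih _ (x ++ (pv_encode_token t char2idx label2idx).1)
      (y ++ (pv_encode_token t char2idx label2idx).2) hok
    refine ⟨cache', ?_, hok'⟩
    simp only [hval] at *
    rw [heq]
    simp [sentX, sentY]

-- B's outer loop in closed form
theorem outerB_fold (corpus : List (List String)) (char2idx label2idx : List (String × Int)) :
    ∀ (cache : PySem.Dict String (List Int × List Int)) (xl yl : List (List Int)),
    CacheOK cache char2idx label2idx →
    (corpus.foldl (fun acc sentence_tokens =>
      let inner := sentence_tokens.foldl (fun st token =>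
        let cache1 := if st.1.contains token then st.1
                      else st.1.insert token (pv_encode_token token char2idx label2idx)
        let v := (cache1.get? token).getD ([], [])
        (cache1, (st.2.1 ++ v.1, st.2.2 ++ v.2)))
        (acc.1, (([] : List Int), ([] : List Int)))
      (inner.1, (acc.2.1 ++ [inner.2.1], acc.2.2 ++ [inner.2.2]))) (cache, (xl, yl))).2
    = (xl ++ corpus.map (fun s => sentX s char2idx label2idx),
       yl ++ corpus.map (fun s => sentY s char2idx label2idx)) := by
  induction corpus with
  | nil => intro cache xl yl _; simp
  | cons s rest ih =>
    intro cache xl yl hc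
    obtain ⟨cache', heq, hok'⟩ := innerB_fold s char2idx label2idx cache [] [] hc
    simp only [List.foldl_cons, heq, List.nil_append]
    rw [ih cache' _ _ hok']
    simp

-- A's per-sentence value equals the flatMap of token encodings
theorem sentA_eq (sent : List String) (char2idx label2idx : List (String × Int)) :
    ((pv_tokenize_chars_and_labels sent).1.map (fun c => pv_encode_char (String.ofList [c]) char2idx),
     (pv_tokenize_chars_and_labels sent).2.map (fun lab => ((PySem.Dict.mk label2idx).get? lab).getD 0))
    = (sentX sent char2idx label2idx, sentY sent char2idx label2idx) := by
  rw [tokenize_eq]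
  refine Prod.ext ?_ ?_ <;> simp only [sentX, sentY, List.map_flatMap]
  · rfl
  · congr 1
    funext t
    rw [← pat_map_str, List.map_map]
    rfl

-- main equivalence
theorem main_eq (corpus : List (List String)) (char2idx label2idx : List (String × Int)) :
    corpus_to_sequences corpus char2idx label2idx = corpus_to_sequences_alt corpus char2idx label2idx := by
  unfold corpus_to_sequences corpus_to_sequences_alt
  rw [outerB_fold corpus char2idx label2idx PySem.Dict.empty [] [] (cacheOK_empty _ _)]
  rw [PySem.List.foldl_prod_mk
    (f := fun a (s : List String) => a ++ [(pv_tokenize_chars_and_labels s).1.map (fun c => pv_encode_char (String.ofList [c]) char2idx)])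
    (g := fun a (s : List String) => a ++ [(pv_tokenize_chars_and_labels s).2.map (fun lab => ((PySem.Dict.mk label2idx).get? lab).getD 0)]),
    PySem.List.foldl_append_singleton_eq_map, PySem.List.foldl_append_singleton_eq_map]
  refine Prod.ext ?_ ?_ <;> simp only
  · exact List.map_congr_left fun s _ => congrArg Prod.fst (sentA_eq s char2idx label2idx)
  · exact List.map_congr_left fun s _ => congrArg Prod.snd (sentA_eq s char2idx label2idx)

-- ===== VERDICT (by name: the statement is the Claim_ definition above) =====
theorem corpus_to_sequences_spec : Claim_equal_corpus_to_sequences := by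
  intro corpus char2idx label2idx _ _
  exact main_eq corpus char2idx label2idx
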